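-- pv_equiv track=rewrite | github.com/yosuanicolaus/practice-python | projects/birthday_paradox.py | has_same_birthday
-- ===== SOURCE A (Python) =====
-- def has_same_birthday(birthdays: list) -> bool:
--     mapped = []
--     for day in birthdays:
--         if day in mapped:
--             return True
--         else:
--             mapped.append(day)
--     return False
-- ===== SOURCE B (Python) =====
-- def has_same_birthday(birthdays: list) -> bool:
--     return len(set(birthdays)) != len(birthdays)
-- ===== Notes on version B (the rewrite author's own statement) =====
-- stated objective: simpler
-- what changed: Replaces the incremental membership-scan loop with early return by a one-shot cardinality comparison: build the set of birthdays and compare its size with the list length.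
import Mathlib
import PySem

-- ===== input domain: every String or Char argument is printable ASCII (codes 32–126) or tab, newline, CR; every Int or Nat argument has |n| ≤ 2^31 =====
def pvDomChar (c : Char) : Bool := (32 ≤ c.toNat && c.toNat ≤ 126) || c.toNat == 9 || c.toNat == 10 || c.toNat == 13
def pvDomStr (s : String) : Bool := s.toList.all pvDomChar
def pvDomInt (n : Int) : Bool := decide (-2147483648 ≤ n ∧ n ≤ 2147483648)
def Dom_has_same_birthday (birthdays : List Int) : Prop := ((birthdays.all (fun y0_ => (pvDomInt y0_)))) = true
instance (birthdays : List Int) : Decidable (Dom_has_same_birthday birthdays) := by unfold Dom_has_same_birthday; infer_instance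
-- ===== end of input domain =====

-- B replaces A's incremental membership-scan loop by a one-shot set-cardinality comparison (objective: simpler).

-- ===== PORT A =====
-- the for-loop with the growing 'mapped' accumulator and early return
def hsbLoop (xs : List Int) (mapped : List Int) : Bool :=
  match xs with
  | [] => false
  | day :: rest => if mapped.contains day then true else hsbLoop rest (mapped ++ [day])

def has_same_birthday (birthdays : List Int) : Bool := hsbLoop birthdays []

-- ===== PORT B =====
def has_same_birthday_alt (birthdays : List Int) : Bool :=
  decide (PySem.Set.len (PySem.Set.ofList birthdays) ≠ (birthdays.length : Int))

-- ===== PRECONDITION & SPEC =====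
def Spec_has_same_birthday (birthdays : List Int) (out : Bool) : Prop := out = has_same_birthday_alt birthdays
instance (birthdays : List Int) (out : Bool) : Decidable (Spec_has_same_birthday birthdays out) := by unfold Spec_has_same_birthday; infer_instance

-- ===== CLAIM (what is proved, stated in full; the proofs are below) =====
def Claim_equal_has_same_birthday : Prop := ∀ (birthdays : List Int), Dom_has_same_birthday birthdays → Spec_has_same_birthday birthdays (has_same_birthday birthdays)

-- ===== LEMMAS AND PROOFS =====

-- A's loop decides "mapped ++ xs has a duplicate" whenever mapped itself has none.
theorem hsbLoop_eq (xs : List Int) : ∀ (mapped : List Int), mapped.Nodup →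
    hsbLoop xs mapped = decide (¬ (mapped ++ xs).Nodup) := by
  induction xs with
  | nil => intro mapped h; simp [hsbLoop, h]
  | cons day rest ih =>
    intro mapped h
    by_cases hd : day ∈ mapped
    · simp [hsbLoop, hd]
      intro hn
      exact (List.disjoint_of_nodup_append hn) hd (by simp)
    · have hnod : (mapped ++ [day]).Nodup := by
        simp only [List.nodup_append, h, List.nodup_cons, List.nodup_nil, and_true, true_and]
        refine ⟨by simp, fun a ha b hb => ?_⟩
        simp only [List.mem_singleton] at hb
        exact fun he => hd ((hb ▸ he) ▸ ha)
      have := ih (mapped ++ [day]) hnod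
      simp only [hsbLoop, List.contains_eq_mem, hd, decide_false, Bool.false_eq_true,
        if_false, this, List.append_assoc, List.singleton_append]

-- foldl add can add at most one element per step
theorem foldl_add_len_le (xs : List Int) : ∀ (s : List Int),
    (xs.foldl PySem.Set.add s).length ≤ s.length + xs.length := by
  induction xs with
  | nil => intro s; simp
  | cons x rest ih =>
    intro s
    have h := ih (PySem.Set.add s x)
    have hlen : (PySem.Set.add s x).length ≤ s.length + 1 := by
      unfold PySem.Set.add
      split <;> simp
    simp only [List.foldl_cons, List.length_cons]
    omega

-- and adds exactly one element per step iff no duplicates appear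
theorem foldl_add_len_eq_iff (xs : List Int) : ∀ (s : List Int), s.Nodup →
    ((xs.foldl PySem.Set.add s).length = s.length + xs.length ↔ (s ++ xs).Nodup) := by
  induction xs with
  | nil => intro s hs; simp [hs]
  | cons x rest ih =>
    intro s hs
    by_cases hx : x ∈ s
    · have hadd : PySem.Set.add s x = s := by
        unfold PySem.Set.add
        simp [List.contains_eq_mem, hx]
      constructor
      · intro h
        exfalso
        have := foldl_add_len_le rest s
        simp only [List.foldl_cons, hadd, List.length_cons] at h
        omega
      · intro hn
        exact absurd (List.disjoint_of_nodup_append hn hx (by simp)) (by simp)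
    · have hadd : PySem.Set.add s x = s ++ [x] := by
        unfold PySem.Set.add
        simp [List.contains_eq_mem, hx]
      have hnod : (s ++ [x]).Nodup := by
        simp only [List.nodup_append, hs, List.nodup_cons, List.nodup_nil, and_true, true_and]
        refine ⟨by simp, fun a ha b hb => ?_⟩
        simp only [List.mem_singleton] at hb
        exact fun he => hx ((hb ▸ he) ▸ ha)
      have := ih (s ++ [x]) hnod
      simp only [List.foldl_cons, hadd, List.length_append, List.length_cons,
        List.length_nil] at this ⊢
      rw [show s.length + (rest.length + 1) = s.length + 1 + rest.length by omega, this]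
      rw [List.append_assoc, List.singleton_append]

theorem alt_eq_nodup (xs : List Int) :
    has_same_birthday_alt xs = decide (¬ xs.Nodup) := by
  unfold has_same_birthday_alt
  have hofl : PySem.Set.ofList xs = xs.foldl PySem.Set.add [] := by
    rw [PySem.Set.ofList_eq_foldl]
  have hle := foldl_add_len_le xs []
  have hiff := foldl_add_len_eq_iff xs [] (by simp)
  simp only [List.length_nil, Nat.zero_add, List.nil_append] at hle hiff
  rcases Decidable.em xs.Nodup with h | h
  · have : (xs.foldl PySem.Set.add []).length = xs.length := hiff.mpr h
    simp [PySem.Set.len, hofl, this, h]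
  · have hne : (xs.foldl PySem.Set.add []).length ≠ xs.length := fun hc => h (hiff.mp hc)
    have : ((xs.foldl PySem.Set.add []).length : Int) ≠ (xs.length : Int) := by
      exact_mod_cast hne
    simp [PySem.Set.len, hofl, this, h]

-- ===== VERDICT (by name: the statement is the Claim_ definition above) =====
theorem has_same_birthday_spec : Claim_equal_has_same_birthday := by
  intro birthdays _
  unfold Spec_has_same_birthday has_same_birthday
  rw [hsbLoop_eq birthdays [] (by simp), alt_eq_nodup]
  simp
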